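-- pv_equiv track=rewrite | github.com/thanhvanhoccode/AlgorithmPractice | 260825_replaceSpecialChar.py | replace_special_char
-- ===== SOURCE A (Python) =====
-- def replace_special_char(s):
--     ss = ["a", 'o', 'e', 'u', 'i', 'y']
--     result = ""
--     for i in s:
--         if i.isupper():
--             for j in ss:
--                 if i.lower() == j:
--                     result += "."
--                     break
--             else:
--                 result += i.lower()
--         else:
--             for j in ss:
--                 if i == j:
--                     result += "."
--                     break
--             else:
--                 result += i
--     return result
-- ===== SOURCE B (Python) =====
-- def replace_special_char(s):
--     vowels = "aoeuiy"
--     table = {}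
--     for c in set(s):
--         lc = c.lower()
--         if lc in vowels:
--             table[ord(c)] = "."
--         elif c.isupper():
--             table[ord(c)] = lc
--     return s.translate(table)
-- ===== Notes on version B (the rewrite author's own statement) =====
-- stated objective: idiomatic
-- what changed: B builds a translation table once over the distinct characters of s and applies it with a single str.translate pass, instead of A's per-character nested membership loop with running string concatenation.
import Mathlib
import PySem

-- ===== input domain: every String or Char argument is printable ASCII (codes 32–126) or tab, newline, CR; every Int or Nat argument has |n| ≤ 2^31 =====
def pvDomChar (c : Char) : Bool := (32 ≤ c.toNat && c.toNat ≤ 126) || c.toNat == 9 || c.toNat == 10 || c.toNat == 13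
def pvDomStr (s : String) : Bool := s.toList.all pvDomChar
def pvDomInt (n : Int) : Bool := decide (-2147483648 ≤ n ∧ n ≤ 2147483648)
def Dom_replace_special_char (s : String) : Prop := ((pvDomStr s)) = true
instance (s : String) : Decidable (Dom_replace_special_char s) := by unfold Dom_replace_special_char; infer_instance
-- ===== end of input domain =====

-- B builds a translation table once over the distinct characters of s and applies it in a single
-- translate pass, instead of A's per-character nested membership loop with string concatenation (idiomatic).

-- ===== PORT A =====
-- the list ss = ["a", 'o', 'e', 'u', 'i', 'y'] (single-character strings, ported as Chars)
def pvSS : List Char := ['a', 'o', 'e', 'u', 'i', 'y']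

-- the inner 'for j in ss: if x == j: … break / else: …' loop: '.' on the first match, fb if none
def pvLoopVow (x : Char) (fb : Char) : List Char → Char
  | [] => fb
  | j :: rest => if x == j then '.' else pvLoopVow x fb rest

def replace_special_char (s : String) : String :=
  String.mk (s.toList.foldl (fun result i =>
    if PySem.Chars.isupper i then
      result ++ [pvLoopVow (PySem.Chars.lowerChar i) (PySem.Chars.lowerChar i) pvSS]
    else
      result ++ [pvLoopVow i i pvSS]) [])

-- ===== PORT B =====
-- vowels = "aoeuiy"; 'lc in vowels' for the single character lc is ported as list membership
def pvVowels : List Char := ['a', 'o', 'e', 'u', 'i', 'y']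

-- one iteration of B's table-building loop over set(s)
def pvStep (d : PySem.Dict Int Char) (c : Char) : PySem.Dict Int Char :=
  let lc := PySem.Chars.lowerChar c
  if pvVowels.contains lc then d.insert (c.toNat : Int) '.'
  else if PySem.Chars.isupper c then d.insert (c.toNat : Int) lc
  else d

-- s.translate(table): each char is replaced by table[ord(c)] when present, else kept
def replace_special_char_alt (s : String) : String :=
  let table := (PySem.Set.ofList s.toList).foldl pvStep PySem.Dict.empty
  String.mk (s.toList.map (fun c => table.getD (c.toNat : Int) c))

-- ===== PRECONDITION & SPEC =====
def Spec_replace_special_char (s : String) (out : String) : Prop := out = replace_special_char_alt s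
instance (s : String) (out : String) : Decidable (Spec_replace_special_char s out) := by unfold Spec_replace_special_char; infer_instance

-- ===== CLAIM (what is proved, stated in full; the proofs are below) =====
def Claim_equal_replace_special_char : Prop := ∀ (s : String), Dom_replace_special_char s → Spec_replace_special_char s (replace_special_char s)

-- ===== LEMMAS AND PROOFS =====

theorem pvToNatInt_inj {a b : Char} (h : (a.toNat : Int) = (b.toNat : Int)) : a = b := by
  have h' : a.toNat = b.toNat := by exact_mod_cast h
  have hinj : Function.Injective Char.toNat :=
    StrictMono.injective (fun _ _ hlt => hlt)
  exact hinj h'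

-- lookup in the table built by folding pvStep over a character list
theorem pvTable_get? (l : List Char) (d : PySem.Dict Int Char) (c : Char) :
    (l.foldl pvStep d).get? (c.toNat : Int) =
      if c ∈ l ∧ (PySem.Chars.lowerChar c ∈ pvVowels ∨ PySem.Chars.isupper c) then
        some (if PySem.Chars.lowerChar c ∈ pvVowels then '.' else PySem.Chars.lowerChar c)
      else d.get? (c.toNat : Int) := by
  induction l generalizing d with
  | nil => simp
  | cons x rest ih =>
    simp only [List.foldl_cons]
    rw [ih]
    by_cases hR : c ∈ rest ∧ (PySem.Chars.lowerChar c ∈ pvVowels ∨ PySem.Chars.isupper c)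
    · simp [hR]
    · simp only [if_neg hR]
      by_cases hx : x = c
      · subst hx
        simp only [pvStep]
        by_cases hv : PySem.Chars.lowerChar x ∈ pvVowels
        · simp [hv, PySem.Dict.get?_insert_self]
        · by_cases hu : PySem.Chars.isupper x
          · simp [hv, hu, PySem.Dict.get?_insert_self]
          · simp [hv, hu]
      · have hne : (c.toNat : Int) ≠ (x.toNat : Int) := fun h => hx (pvToNatInt_inj h).symm
        have hstep : (pvStep d x).get? (c.toNat : Int) = d.get? (c.toNat : Int) := by
          simp only [pvStep]
          split_ifs <;> simp [PySem.Dict.get?_insert_of_ne _ _ hne]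
        rw [hstep]
        have hmem : ¬ (c ∈ x :: rest ∧ (PySem.Chars.lowerChar c ∈ pvVowels ∨ PySem.Chars.isupper c)) := by
          rintro ⟨hm, hcond⟩
          rcases List.mem_cons.mp hm with h | h
          · exact hx h.symm
          · exact hR ⟨h, hcond⟩
        rw [if_neg hmem]

-- the inner for/else loop over the concrete ss is membership in pvVowels
theorem pvLoopVow_eq (x fb : Char) :
    pvLoopVow x fb pvSS = if pvVowels.contains x then '.' else fb := by
  simp only [pvSS, pvVowels, pvLoopVow, List.contains_eq_mem]
  by_cases h1 : x = 'a'; · simp [h1]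
  by_cases h2 : x = 'o'; · simp [h2]
  by_cases h3 : x = 'e'; · simp [h3]
  by_cases h4 : x = 'u'; · simp [h4]
  by_cases h5 : x = 'i'; · simp [h5]
  by_cases h6 : x = 'y'; · simp [h6]
  simp [h1, h2, h3, h4, h5, h6, beq_iff_eq]

theorem pvLower_of_not_upper {c : Char} (h : PySem.Chars.isupper c = false) :
    PySem.Chars.lowerChar c = c := by
  simp [PySem.Chars.lowerChar, h]

-- pointwise: for c a character of s, the table lookup is exactly what A appends for c
theorem pvPointwise (s : String) (c : Char) (hc : c ∈ s.toList) :
    ((PySem.Set.ofList s.toList).foldl pvStep PySem.Dict.empty).getD (c.toNat : Int) c =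
      (if PySem.Chars.isupper c then
        pvLoopVow (PySem.Chars.lowerChar c) (PySem.Chars.lowerChar c) pvSS
      else pvLoopVow c c pvSS) := by
  have hmem : c ∈ PySem.Set.ofList s.toList := (PySem.Set.mem_ofList _ _).mpr hc
  rw [PySem.Dict.getD_eq_get?_getD, pvTable_get? _ _ c]
  by_cases hu : PySem.Chars.isupper c
  · simp [hmem, hu, pvLoopVow_eq]
  · have hl : PySem.Chars.lowerChar c = c := pvLower_of_not_upper (by simpa using hu)
    rw [hl]
    by_cases hv : c ∈ pvVowels
    · simp [hmem, hu, hv, pvLoopVow_eq]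
    · simp [hmem, hu, hv, pvLoopVow_eq]

-- ===== VERDICT (by name: the statement is the Claim_ definition above) =====
theorem replace_special_char_spec : Claim_equal_replace_special_char := by
  intro s _
  unfold Spec_replace_special_char replace_special_char replace_special_char_alt
  congr 1
  have hb : (fun (result : List Char) (i : Char) =>
      if PySem.Chars.isupper i then
        result ++ [pvLoopVow (PySem.Chars.lowerChar i) (PySem.Chars.lowerChar i) pvSS]
      else result ++ [pvLoopVow i i pvSS]) =
      (fun (result : List Char) (i : Char) =>
        result ++ [if PySem.Chars.isupper i then
          pvLoopVow (PySem.Chars.lowerChar i) (PySem.Chars.lowerChar i) pvSS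
        else pvLoopVow i i pvSS]) := by
    funext r i; split_ifs <;> rfl
  rw [hb, PySem.List.foldl_append_singleton_eq_map]
  exact List.map_congr_left fun c hc => (pvPointwise s c hc).symm
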